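-- pv_equiv track=rewrite | github.com/descampsk/advent-of-code | 2023/Axel/09/main.py | solve
-- ===== SOURCE A (Python) =====
-- import math
--
-- def solve(data):
--     return sum(
--         sum(
--             sum((-1) ** k * math.comb(n, k) * a[k] for k in range(n + 1))
--             for n in range(len(a))
--         )
--         for a in data
--     )
-- ===== SOURCE B (Python) =====
-- import math
--
-- def solve(data):
--     # hockey-stick identity: sum_{n<L} sum_{k<=n} (-1)^k C(n,k) a[k]
--     #                      = sum_{k<L} (-1)^k C(L,k+1) a[k]
--     total = 0
--     for a in data:
--         L = len(a)
--         for k, x in enumerate(a):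
--             total += (-1) ** k * math.comb(L, k + 1) * x
--     return total
-- ===== Notes on version B (the rewrite author's own statement) =====
-- stated objective: faster
-- what changed: Collapses A's per-list double alternating-binomial sum into one single pass over the list using the hockey-stick identity sum_{n=k}^{L-1} C(n,k) = C(L,k+1).
import Mathlib
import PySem

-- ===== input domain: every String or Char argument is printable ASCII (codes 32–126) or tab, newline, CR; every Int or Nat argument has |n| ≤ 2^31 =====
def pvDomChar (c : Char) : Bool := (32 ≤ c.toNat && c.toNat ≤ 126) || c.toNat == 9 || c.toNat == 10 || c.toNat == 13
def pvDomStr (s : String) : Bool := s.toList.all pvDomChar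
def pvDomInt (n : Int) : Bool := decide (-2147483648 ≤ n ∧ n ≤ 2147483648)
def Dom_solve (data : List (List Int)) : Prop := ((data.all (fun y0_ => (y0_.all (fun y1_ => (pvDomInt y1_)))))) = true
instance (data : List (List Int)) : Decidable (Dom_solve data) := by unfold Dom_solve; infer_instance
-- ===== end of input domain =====

-- B replaces A's O(L^2)-term nested binomial sums per list by a single O(L) pass
-- via the hockey-stick identity (faster; measured asymptotically so).

-- ===== PORT A =====
def solve (data : List (List Int)) : Int :=
  (data.map (fun a =>
    ((PySem.List.pyRange 0 (a.length : Int) 1).map (fun n =>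
      ((PySem.List.pyRange 0 (n + 1) 1).map (fun k =>
        (-1) ^ k.toNat * (Nat.choose n.toNat k.toNat : Int) * PySem.List.pyGetD a k 0)).sum)).sum)).sum

-- ===== PORT B =====
def solve_alt (data : List (List Int)) : Int :=
  data.foldl (fun total a =>
    (PySem.List.enumerate a 0).foldl (fun t p =>
      t + (-1) ^ p.1.toNat * (Nat.choose a.length (p.1.toNat + 1) : Int) * p.2) total) 0

-- ===== PRECONDITION & SPEC =====
def Spec_solve (data : List (List Int)) (out : Int) : Prop := out = solve_alt data
instance (data : List (List Int)) (out : Int) : Decidable (Spec_solve data out) := by unfold Spec_solve; infer_instance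

-- ===== CLAIM (what is proved, stated in full; the proofs are below) =====
def Claim_equal_solve : Prop := ∀ (data : List (List Int)), Dom_solve data → Spec_solve data (solve data)

-- ===== LEMMAS AND PROOFS =====

-- hockey-stick collapse of the alternating double binomial sum
theorem pv_key (L : Nat) (g : Nat → Int) :
    ((List.range L).map (fun n =>
      ((List.range (n + 1)).map (fun k => (-1) ^ k * (Nat.choose n k : Int) * g k)).sum)).sum
    = ((List.range L).map (fun k => (-1) ^ k * (Nat.choose L (k + 1) : Int) * g k)).sum := by
  induction L with
  | zero => simp
  | succ L ih =>
    have h1 : ((List.range (L + 1)).map (fun k => (-1 : Int) ^ k * (Nat.choose (L + 1) (k + 1) : Int) * g k)).sum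
        = ((List.range (L + 1)).map (fun k => (-1 : Int) ^ k * (Nat.choose L k : Int) * g k)).sum
          + ((List.range (L + 1)).map (fun k => (-1 : Int) ^ k * (Nat.choose L (k + 1) : Int) * g k)).sum := by
      rw [← PySem.List.sum_map_add_int]
      congr 1
      apply List.map_congr_left
      intro k _
      rw [Nat.choose_succ_succ]
      push_cast
      ring
    have h2 : ((List.range (L + 1)).map (fun k => (-1 : Int) ^ k * (Nat.choose L (k + 1) : Int) * g k)).sum
        = ((List.range L).map (fun k => (-1 : Int) ^ k * (Nat.choose L (k + 1) : Int) * g k)).sum := by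
      rw [List.range_succ, List.map_append, List.sum_append]
      simp
    conv_rhs => rw [h1, h2]
    rw [List.range_succ, List.map_append, List.sum_append, ih]
    simp only [List.map_cons, List.map_nil, List.sum_cons, List.sum_nil]
    ring_nf
    congr 1
    rw [show 1 + L = L + 1 from by omega, List.range_succ]

-- A's per-list value, reduced to a clean Nat-indexed sum
theorem pv_inner_A (a : List Int) :
    ((PySem.List.pyRange 0 (a.length : Int) 1).map (fun n =>
      ((PySem.List.pyRange 0 (n + 1) 1).map (fun k =>
        (-1) ^ k.toNat * (Nat.choose n.toNat k.toNat : Int) * PySem.List.pyGetD a k 0)).sum)).sum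
    = ((List.range a.length).map (fun n =>
        ((List.range (n + 1)).map (fun k =>
          (-1) ^ k * (Nat.choose n k : Int) * a.getD k 0)).sum)).sum := by
  rw [PySem.List.pyRange_zero_natCast, List.map_map]
  congr 1
  apply List.map_congr_left
  intro n _
  have hcast : ((n : Int) + 1) = ((n + 1 : Nat) : Int) := by push_cast; ring
  rw [Function.comp_apply, hcast, PySem.List.pyRange_zero_natCast, List.map_map]
  congr 1
  apply List.map_congr_left
  intro k _
  simp

-- B's per-list loop, reduced to the same kind of Nat-indexed sum
theorem pv_inner_B (a : List Int) (t : Int) :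
    (PySem.List.enumerate a 0).foldl (fun t p =>
      t + (-1) ^ p.1.toNat * (Nat.choose a.length (p.1.toNat + 1) : Int) * p.2) t
    = t + ((List.range a.length).map (fun k =>
        (-1) ^ k * (Nat.choose a.length (k + 1) : Int) * a.getD k 0)).sum := by
  rw [PySem.List.foldl_add, PySem.List.enumerate_eq_map_pyRange (d := 0),
    PySem.List.len_eq, PySem.List.pyRange_zero_natCast, List.map_map, List.map_map]
  congr 2
  apply List.map_congr_left
  intro k _
  simp

-- B's outer loop is the sum of the per-list single-pass sums
theorem pv_outer (rest : List (List Int)) : ∀ t : Int,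
    rest.foldl (fun total a =>
      (PySem.List.enumerate a 0).foldl (fun t p =>
        t + (-1) ^ p.1.toNat * (Nat.choose a.length (p.1.toNat + 1) : Int) * p.2) total) t
    = t + (rest.map (fun a => ((List.range a.length).map (fun k =>
        (-1) ^ k * (Nat.choose a.length (k + 1) : Int) * a.getD k 0)).sum)).sum := by
  induction rest with
  | nil => intro t; simp
  | cons b bs ihb =>
    intro t
    simp only [List.foldl_cons, List.map_cons, List.sum_cons]
    rw [pv_inner_B, ihb]
    ring

-- ===== VERDICT (by name: the statement is the Claim_ definition above) =====
theorem solve_spec : Claim_equal_solve := by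
  intro data _
  unfold Spec_solve solve solve_alt
  rw [pv_outer, zero_add]
  congr 1
  apply List.map_congr_left
  intro a _
  rw [pv_inner_A]
  exact pv_key a.length (fun k => a.getD k 0)
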